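-- pv_equiv track=rewrite | github.com/none-None1/EsoDev | extensions/wee.py | syntaxhighlighter
-- ===== SOURCE A (Python) =====
-- def syntaxhighlighter(text):
--     colors = {
--         "Start epidemic": "#0D66AB",
--         "Infect person": "#007F00",
--         "Deinfect person": "#0D17AB",
--         "Bulk infect": "#0DAD51",
--         "Check number of infections": "#414DF1",
--         "Bulk deinfect": "#0DABA0",
--         "Skip next if no one infected": "#41A5F1",
--         "Delevop vaccine": "#11E4D6",
--     }
--     result = []
--     for i in text.split("\n")[:-1]:
--         if i in colors:
--             result += [(colors[i], i)]
--         else: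
--             result += [("#000000", i)]
--         result += [("#000000", "\n")]
--     if text.split("\n")[-1] in colors:
--         result += [(colors[text.split("\n")[-1]], text.split("\n")[-1])]
--     else:
--         result += [("#000000", text.split("\n")[-1])]
--     return result
-- ===== SOURCE B (Python) =====
-- def syntaxhighlighter(text):
--     colors = {
--         "Start epidemic": "#0D66AB",
--         "Infect person": "#007F00",
--         "Deinfect person": "#0D17AB",
--         "Bulk infect": "#0DAD51",
--         "Check number of infections": "#414DF1",
--         "Bulk deinfect": "#0DABA0",
--         "Skip next if no one infected": "#41A5F1",
--         "Delevop vaccine": "#11E4D6",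
--     }
--     result = []
--     cur = []
--     for ch in text:
--         if ch == "\n":
--             line = "".join(cur)
--             result.append((colors.get(line, "#000000"), line))
--             result.append(("#000000", "\n"))
--             cur = []
--         else:
--             cur.append(ch)
--     line = "".join(cur)
--     result.append((colors.get(line, "#000000"), line))
--     return result
-- ===== Notes on version B (the rewrite author's own statement) =====
-- stated objective: alternative
-- what changed: B never splits the text: it is a single character-by-character scan with a current-line accumulator, emitting a colored token plus a newline token each time a newline character is seen and flushing the pending line at the end, whereas A splits into lines and post-processes the split list with a [:-1] loop plus a duplicated last-line block.
import Mathlib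
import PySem

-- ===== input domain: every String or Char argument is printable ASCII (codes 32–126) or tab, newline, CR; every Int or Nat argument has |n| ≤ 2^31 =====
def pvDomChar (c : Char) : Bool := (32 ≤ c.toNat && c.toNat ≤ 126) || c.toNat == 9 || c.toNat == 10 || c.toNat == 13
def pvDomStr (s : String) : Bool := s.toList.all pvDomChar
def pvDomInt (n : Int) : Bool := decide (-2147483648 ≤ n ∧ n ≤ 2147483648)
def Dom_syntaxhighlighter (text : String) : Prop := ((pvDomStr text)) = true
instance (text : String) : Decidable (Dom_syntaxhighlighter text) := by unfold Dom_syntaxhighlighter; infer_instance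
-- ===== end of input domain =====

-- B replaces A's split-then-postprocess (a [:-1] loop plus a duplicated last-line block that
-- re-splits the text) by a single character-by-character scan with a current-line accumulator
-- (objective: alternative, same cost).

-- ===== PORT A =====
-- literal transliteration of A: loop over text.split("\n")[:-1], then the separate last-line block;
-- text.split("\n") never raises (sep ≠ ""), so .getD [] is never the default branch.
def syntaxhighlighter (text : String) : List (String × String) :=
  let colors : PySem.Dict String String := PySem.Dict.ofList
    [("Start epidemic", "#0D66AB"), ("Infect person", "#007F00"),
     ("Deinfect person", "#0D17AB"), ("Bulk infect", "#0DAD51"),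
     ("Check number of infections", "#414DF1"), ("Bulk deinfect", "#0DABA0"),
     ("Skip next if no one infected", "#41A5F1"), ("Delevop vaccine", "#11E4D6")]
  let result : List (String × String) :=
    (PySem.List.slice ((PySem.Str.split? text "\n").getD []) none (some (-1))).foldl
      (fun result i =>
        (if colors.contains i then result ++ [(colors.getD i "", i)]
         else result ++ [("#000000", i)]) ++ [("#000000", "\n")])
      []
  let last : String := PySem.List.pyGetD ((PySem.Str.split? text "\n").getD []) (-1) ""
  if colors.contains last then result ++ [(colors.getD last "", last)]
  else result ++ [("#000000", last)]

-- ===== PORT B =====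
-- literal transliteration of B: one char-by-char scan over text; state = (result, cur);
-- on '\n' flush cur as a line token plus a newline token, else append the char to cur;
-- after the loop, flush the final pending line.  ''.join(cur) → String.ofList.
def syntaxhighlighter_alt (text : String) : List (String × String) :=
  let colors : PySem.Dict String String := PySem.Dict.ofList
    [("Start epidemic", "#0D66AB"), ("Infect person", "#007F00"),
     ("Deinfect person", "#0D17AB"), ("Bulk infect", "#0DAD51"),
     ("Check number of infections", "#414DF1"), ("Bulk deinfect", "#0DABA0"),
     ("Skip next if no one infected", "#41A5F1"), ("Delevop vaccine", "#11E4D6")]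
  let st : List (String × String) × List Char :=
    text.toList.foldl
      (fun st ch =>
        if ch = '\n' then
          let line := String.ofList st.2
          (st.1 ++ [(colors.getD line "#000000", line)] ++ [("#000000", "\n")], [])
        else
          (st.1, st.2 ++ [ch]))
      ([], [])
  let line := String.ofList st.2
  st.1 ++ [(colors.getD line "#000000", line)]

-- ===== PRECONDITION & SPEC =====
def Spec_syntaxhighlighter (text : String) (out : List (String × String)) : Prop := out = syntaxhighlighter_alt text
instance (text : String) (out : List (String × String)) : Decidable (Spec_syntaxhighlighter text out) := by unfold Spec_syntaxhighlighter; infer_instance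

-- ===== CLAIM (what is proved, stated in full; the proofs are below) =====
def Claim_equal_syntaxhighlighter : Prop := ∀ (text : String), Dom_syntaxhighlighter text → Spec_syntaxhighlighter text (syntaxhighlighter text)

-- ===== LEMMAS AND PROOFS =====

-- the colors dict, named for the proofs
def pvColors : PySem.Dict String String := PySem.Dict.ofList
  [("Start epidemic", "#0D66AB"), ("Infect person", "#007F00"),
   ("Deinfect person", "#0D17AB"), ("Bulk infect", "#0DAD51"),
   ("Check number of infections", "#414DF1"), ("Bulk deinfect", "#0DABA0"),
   ("Skip next if no one infected", "#41A5F1"), ("Delevop vaccine", "#11E4D6")]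

-- the token for a line, and the newline token
def pvE (i : String) : String × String := (pvColors.getD i "#000000", i)
def pvNl : String × String := ("#000000", "\n")

-- canonical rendering of a nonempty list of lines appended to res
def pvCanon (res : List (String × String)) : List (List Char) → List (String × String)
  | [] => res
  | x :: rest => rest.foldl (fun r i => (r ++ [pvNl]) ++ [pvE (String.ofList i)])
      (res ++ [pvE (String.ofList x)])

-- splitOn always yields at least one piece
theorem pv_go_ne_nil (sep : List Char) : ∀ (fuel : Nat) (l cur : List Char) (acc : List (List Char)),
    PySem.Chars.splitOn.go sep fuel l cur acc ≠ [] := by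
  intro fuel
  induction fuel with
  | zero => intro l cur acc; simp [PySem.Chars.splitOn.go]
  | succ n ih =>
    intro l cur acc
    cases l with
    | nil => simp [PySem.Chars.splitOn.go]
    | cons c rest =>
      rw [PySem.Chars.splitOn.go]
      split
      · exact ih _ _ _
      · exact ih _ _ _

-- go's accumulator can be pulled out front
theorem pv_go_acc (sep : List Char) : ∀ (fuel : Nat) (l cur : List Char) (acc : List (List Char)),
    PySem.Chars.splitOn.go sep fuel l cur acc
      = acc.reverse ++ PySem.Chars.splitOn.go sep fuel l cur [] := by
  intro fuel
  induction fuel with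
  | zero => intro l cur acc; simp [PySem.Chars.splitOn.go]
  | succ n ih =>
    intro l cur acc
    cases l with
    | nil => simp [PySem.Chars.splitOn.go]
    | cons c rest =>
      rw [PySem.Chars.splitOn.go]
      conv_rhs => rw [PySem.Chars.splitOn.go]
      by_cases hp : sep.isPrefixOf (c :: rest) = true
      · rw [if_pos hp, if_pos hp, ih _ _ (cur.reverse :: acc), ih _ _ [cur.reverse]]
        simp
      · rw [if_neg hp, if_neg hp, ih rest (c :: cur) acc]

-- appending one completed line into pvCanon
theorem pv_canon_cons (res : List (String × String)) (x : List Char) (ls : List (List Char))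
    (h : ls ≠ []) :
    pvCanon res (x :: ls) = pvCanon (res ++ [pvE (String.ofList x)] ++ [pvNl]) ls := by
  cases ls with
  | nil => exact absurd rfl h
  | cons y t => simp [pvCanon]

-- A's membership-test-then-lookup entry equals the pvE entry
theorem pv_entry_eq (r : List (String × String)) (i : String) :
    (if pvColors.contains i then r ++ [(pvColors.getD i "", i)] else r ++ [(("#000000" : String), i)])
      = r ++ [pvE i] := by
  unfold pvE
  rw [PySem.Dict.contains_eq_isSome_get?]
  cases h : pvColors.get? i with
  | none => simp [h, PySem.Dict.getD_eq_get?_getD]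
  | some v => simp [h, PySem.Dict.getD_eq_get?_getD]

-- core: B's char scan, finished, equals pvCanon of splitOn.go on the remaining text
theorem pv_scan (fuel : Nat) : ∀ (l cur : List Char) (res : List (String × String)),
    l.length < fuel →
    (let st := l.foldl
        (fun (st : List (String × String) × List Char) ch =>
          if ch = '\n' then
            (st.1 ++ [pvE (String.ofList st.2)] ++ [pvNl], [])
          else (st.1, st.2 ++ [ch]))
        (res, cur)
     st.1 ++ [pvE (String.ofList st.2)])
      = pvCanon res (PySem.Chars.splitOn.go ['\n'] fuel l cur.reverse []) := by
  induction fuel with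
  | zero => intro l cur res h; omega
  | succ n ih =>
    intro l cur res h
    cases l with
    | nil => simp [PySem.Chars.splitOn.go, pvCanon]
    | cons c rest =>
      rw [PySem.Chars.splitOn.go]
      by_cases hc : c = '\n'
      · subst hc
        rw [if_pos (by simp [List.isPrefixOf])]
        rw [pv_go_acc]
        simp only [List.length_singleton, List.drop_succ_cons, List.drop_zero,
          List.reverse_cons, List.reverse_nil, List.nil_append, List.reverse_reverse,
          List.singleton_append]
        rw [pv_canon_cons _ _ _ (pv_go_ne_nil _ _ _ _ _)]
        have hrec := ih rest [] (res ++ [pvE (String.ofList cur)] ++ [pvNl])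
          (by simpa using Nat.lt_of_succ_lt_succ h)
        simp only [List.reverse_nil] at hrec
        simpa using hrec
      · rw [if_neg (by simp [List.isPrefixOf]; exact fun h' => hc h'.symm)]
        have hrec := ih rest (cur ++ [c]) res (by simpa using Nat.lt_of_succ_lt_succ h)
        simp only [List.reverse_append, List.reverse_singleton, List.singleton_append] at hrec
        simpa [hc] using hrec

-- A equals the canonical form (one fold over dropLast + last element)
theorem pv_shape : ∀ (rest : List (List Char)) (x : List Char) (acc : List (String × String)),
    ((((x :: rest).map String.ofList).dropLast.foldl
        (fun r i => (r ++ [pvE i]) ++ [pvNl]) acc))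
        ++ [pvE (((x :: rest).map String.ofList).getLast (by simp))]
      = pvCanon acc (x :: rest) := by
  intro rest
  induction rest with
  | nil => intro x acc; simp [pvCanon]
  | cons y t ih =>
    intro x acc
    simp only [List.map_cons] at *
    rw [show (String.ofList x :: String.ofList y :: t.map String.ofList).dropLast
          = String.ofList x :: (String.ofList y :: t.map String.ofList).dropLast from rfl]
    simp only [List.foldl_cons]
    rw [List.getLast_cons (by simp), ih y ((acc ++ [pvE (String.ofList x)]) ++ [pvNl])]
    cases t with
    | nil => simp [pvCanon]
    | cons z u => simp [pvCanon]

theorem syntaxhighlighter_eq (text : String) :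
    syntaxhighlighter text = syntaxhighlighter_alt text := by
  simp only [syntaxhighlighter, syntaxhighlighter_alt]
  have hsplit : (PySem.Str.split? text "\n").getD [] =
      (PySem.Chars.splitOn text.toList "\n".toList).map String.ofList := by
    simp [PySem.Str.split?, PySem.Chars.split?]
  rw [hsplit]
  have hgo : PySem.Chars.splitOn text.toList "\n".toList
      = PySem.Chars.splitOn.go ['\n'] (text.toList.length + 1) text.toList [] [] := rfl
  -- B side
  have hB := pv_scan (text.toList.length + 1) text.toList [] [] (by omega)
  simp only [List.reverse_nil] at hB
  rw [show (PySem.Dict.ofList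
      [("Start epidemic", "#0D66AB"), ("Infect person", "#007F00"),
       ("Deinfect person", "#0D17AB"), ("Bulk infect", "#0DAD51"),
       ("Check number of infections", "#414DF1"), ("Bulk deinfect", "#0DABA0"),
       ("Skip next if no one infected", "#41A5F1"), ("Delevop vaccine", "#11E4D6")])
    = pvColors from rfl]
  -- rewrite B's fold body to the pvE/pvNl form
  have hbodyB : (fun (st : List (String × String) × List Char) ch =>
      if ch = '\n' then
        (st.1 ++ [(pvColors.getD (String.ofList st.2) "#000000", String.ofList st.2)]
          ++ [("#000000", "\n")], ([] : List Char))
      else (st.1, st.2 ++ [ch]))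
      = (fun (st : List (String × String) × List Char) ch =>
      if ch = '\n' then (st.1 ++ [pvE (String.ofList st.2)] ++ [pvNl], [])
      else (st.1, st.2 ++ [ch])) := by
    funext st ch; simp [pvE, pvNl]
  -- A side
  obtain ⟨x, rest, hcons⟩ := List.exists_cons_of_ne_nil
    (pv_go_ne_nil ['\n'] (text.toList.length + 1) text.toList [] [])
  have hbodyA : (fun (r : List (String × String)) i =>
      (if pvColors.contains i then r ++ [(pvColors.getD i "", i)] else r ++ [("#000000", i)])
        ++ [("#000000", "\n")])
      = fun r i => (r ++ [pvE i]) ++ [pvNl] := by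
    funext r i; rw [pv_entry_eq]; rfl
  rw [hgo, hcons]
  have hnil : ((x :: rest).map String.ofList) ≠ [] := by simp
  rw [PySem.List.slice_to_neg_one, PySem.List.pyGetD_neg_one _ _ hnil, pv_entry_eq, hbodyA]
  rw [pv_shape rest x []]
  -- finish B
  simp only [hbodyB]
  simp only [show ∀ i : String, (pvColors.getD i "#000000", i) = pvE i from fun _ => rfl]
  rw [hB, hcons]

-- ===== VERDICT (by name: the statement is the Claim_ definition above) =====
theorem syntaxhighlighter_spec : Claim_equal_syntaxhighlighter := by
  intro text _
  unfold Spec_syntaxhighlighter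
  exact syntaxhighlighter_eq text
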